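-- pv_equiv track=rewrite | github.com/vladvintilescu01/Car-Troubleshooting-System | car_troubleshooting_system/inference_engine.py | find_causes_with_chain
-- ===== SOURCE A (Python) =====
-- def parse_condition(condition_str):
--     """Parse a condition string and return set of required symptoms"""
--     # Split by AND to get individual conditions
--     parts = [part.strip() for part in condition_str.split("AND")]
--     return set(parts)
--
-- def forward_chain(symptom, rules, visited=None, facts=None):
--     """Return full chain of causes for a symptom, avoiding duplicates"""
--     if visited is None:
--         visited = set()
--     if facts is None:
--         facts = set()
--
--     chains = []
--     for condition, result in rules:
--         # Parse the condition to handle AND logic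
--         required_symptoms = parse_condition(condition)
--
--         # Only proceed if the condition has exactly one symptom and it matches
--         if len(required_symptoms) == 1 and list(required_symptoms)[0].lower() == symptom.lower():
--             if result.lower() not in visited:
--                 visited.add(result.lower())
--                 sub_chains = forward_chain(result, rules, visited.copy(), facts)
--                 if sub_chains:
--                     for sub in sub_chains:
--                         chains.append(f"{result} -> {sub}")
--                 else:
--                     chains.append(result)
--     return chains
--
-- def find_causes_with_chain(symptom, rules):
--     """Return possible causes with inference chain integrated"""
--     causes = []
--
--     for condition, result in rules:
--         # Parse the condition to handle AND logic properly
--         required_symptoms = parse_condition(condition)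
--
--         # Only match if:
--         # 1. The condition has exactly ONE symptom (no AND)
--         # 2. That symptom matches the input symptom
--         if len(required_symptoms) == 1 and list(required_symptoms)[0].lower() == symptom.lower():
--             chain = forward_chain(result, rules)
--             if chain:
--                 causes.append(f"{result} -> " + " -> ".join(chain))
--             else:
--                 causes.append(result)
--
--     return causes
-- ===== SOURCE B (Python) =====
-- def find_causes_with_chain(symptom, rules):
--     """Return possible causes with inference chain integrated.
--
--     Precomputes a symptom -> results adjacency dict once (order-preserving),
--     then runs DFS over it, instead of re-parsing all rules at every node.
--     """
--     adj = {}
--     for condition, result in rules: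
--         parts = [part.strip() for part in condition.split("AND")]
--         first = parts[0]
--         if all(p == first for p in parts):
--             adj.setdefault(first.lower(), []).append(result)
--
--     def dfs(sym, visited):
--         chains = []
--         for res in adj.get(sym.lower(), []):
--             low = res.lower()
--             if low not in visited:
--                 visited.add(low)
--                 sub = dfs(res, visited.copy())
--                 if sub:
--                     chains.extend(f"{res} -> {s}" for s in sub)
--                 else:
--                     chains.append(res)
--         return chains
--
--     causes = []
--     for res in adj.get(symptom.lower(), []):
--         chain = dfs(res, set())
--         causes.append(f"{res} -> " + " -> ".join(chain) if chain else res)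
--     return causes
-- ===== Notes on version B (the rewrite author's own statement) =====
-- stated objective: faster
-- what changed: B parses every rule's condition once into an order-preserving lowercase-symptom-to-results adjacency dict and runs the chain DFS over that dict, instead of A's re-scanning and re-parsing all rules' conditions at every node of the recursion.
import Mathlib
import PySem

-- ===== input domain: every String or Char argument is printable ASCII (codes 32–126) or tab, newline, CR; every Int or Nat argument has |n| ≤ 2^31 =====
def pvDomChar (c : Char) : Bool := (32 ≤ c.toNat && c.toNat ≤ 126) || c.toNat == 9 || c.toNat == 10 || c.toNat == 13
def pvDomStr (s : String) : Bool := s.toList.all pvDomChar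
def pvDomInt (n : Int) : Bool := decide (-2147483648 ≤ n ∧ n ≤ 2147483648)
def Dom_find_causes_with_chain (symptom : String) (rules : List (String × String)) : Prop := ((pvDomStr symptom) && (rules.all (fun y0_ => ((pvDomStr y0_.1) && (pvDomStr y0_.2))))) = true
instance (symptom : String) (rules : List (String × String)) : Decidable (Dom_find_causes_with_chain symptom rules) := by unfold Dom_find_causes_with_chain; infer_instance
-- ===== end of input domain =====

-- B precomputes the symptom→results adjacency dict once and runs DFS over it,
-- instead of A's re-parsing of every rule's condition at every node (objective: faster).

-- ===== PORT A =====

-- parse_condition: split on "AND", strip each part, collect as a set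
-- split? is `some` whenever the separator is nonempty, as "AND" is: getD [] is exact here
def parse_condition (condition_str : String) : PySem.Set String :=
  PySem.Set.ofList (((PySem.Str.split? condition_str "AND").getD []).map PySem.Str.strip)

-- the inline match test A performs twice: len(required) == 1 and
-- list(required)[0].lower() == symptom.lower()  (headD is safe: len = 1)
def pvMatchA (symptom condition : String) : Bool :=
  let required := parse_condition condition
  required.length == 1 && (PySem.Str.lower (required.headD "") == PySem.Str.lower symptom)

-- forward_chain; the recursion is bounded by fuel (each recursive call strictly
-- grows `visited`, whose elements are lowered rule results, so with the callers'
-- fuel = rules.length + 1 the fuel-0 branch is never the returned value)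
def forward_chain : Nat → String → List (String × String) → PySem.Set String → List String
  | 0, _, _, _ => []
  | fuel+1, symptom, rules, visited =>
    (rules.foldl
      (fun (st : PySem.Set String × List String) p =>
        if pvMatchA symptom p.1 then
          if !(PySem.Set.contains st.1 (PySem.Str.lower p.2)) then
            let visited' := PySem.Set.add st.1 (PySem.Str.lower p.2)
            let sub := forward_chain fuel p.2 rules visited'
            if sub ≠ [] then
              (visited', st.2 ++ sub.map (fun s => p.2 ++ " -> " ++ s))
            else
              (visited', st.2 ++ [p.2])
          else st
        else st)
      (visited, ([] : List String))).2

def find_causes_with_chain (symptom : String) (rules : List (String × String)) : List String :=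
  rules.foldl
    (fun causes p =>
      if pvMatchA symptom p.1 then
        let chain := forward_chain (rules.length + 1) p.2 rules PySem.Set.empty
        if chain ≠ [] then
          causes ++ [p.2 ++ " -> " ++ PySem.Str.join " -> " chain]
        else
          causes ++ [p.2]
      else causes)
    []

-- ===== PORT B =====

-- B: a condition contributes under key k iff all its stripped parts are equal
-- (then k is their common lowercase value)
def singleKey (condition : String) : Option String :=
  match ((PySem.Str.split? condition "AND").getD []).map PySem.Str.strip with
  | [] => none    -- unreachable: split on a nonempty separator returns ≥ 1 piece
  | first :: rest =>
    if rest.all (· == first) then some (PySem.Str.lower first) else none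

-- adj: lowercase single symptom → list of results, in rule order
def build_adj (rules : List (String × String)) : PySem.Dict String (List String) :=
  rules.foldl
    (fun d p =>
      match singleKey p.1 with
      | some k => d.modify k [] (fun l => l ++ [p.2])   -- setdefault(k, []).append(result)
      | none => d)
    PySem.Dict.empty

def dfs_alt : Nat → PySem.Dict String (List String) → String → PySem.Set String → List String
  | 0, _, _, _ => []
  | fuel+1, adj, sym, visited =>
    ((adj.getD (PySem.Str.lower sym) []).foldl
      (fun (st : PySem.Set String × List String) res =>
        if !(PySem.Set.contains st.1 (PySem.Str.lower res)) then
          let visited' := PySem.Set.add st.1 (PySem.Str.lower res)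
          let sub := dfs_alt fuel adj res visited'
          if sub ≠ [] then
            (visited', st.2 ++ sub.map (fun s => res ++ " -> " ++ s))
          else
            (visited', st.2 ++ [res])
        else st)
      (visited, ([] : List String))).2

def find_causes_with_chain_alt (symptom : String) (rules : List (String × String)) : List String :=
  let adj := build_adj rules
  (adj.getD (PySem.Str.lower symptom) []).foldl
    (fun causes res =>
      let chain := dfs_alt (rules.length + 1) adj res PySem.Set.empty
      if chain ≠ [] then
        causes ++ [res ++ " -> " ++ PySem.Str.join " -> " chain]
      else
        causes ++ [res])
    []

-- ===== PRECONDITION & SPEC =====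
def Spec_find_causes_with_chain (symptom : String) (rules : List (String × String)) (out : List String) : Prop := out = find_causes_with_chain_alt symptom rules
instance (symptom : String) (rules : List (String × String)) (out : List String) : Decidable (Spec_find_causes_with_chain symptom rules out) := by unfold Spec_find_causes_with_chain; infer_instance

-- ===== CLAIM (what is proved, stated in full; the proofs are below) =====
def Claim_equal_find_causes_with_chain : Prop := ∀ (symptom : String) (rules : List (String × String)), Dom_find_causes_with_chain symptom rules → Spec_find_causes_with_chain symptom rules (find_causes_with_chain symptom rules)

-- ===== LEMMAS AND PROOFS =====

theorem pv_discard_nil_iff (first : String) (rest : List String) :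
    ((PySem.Set.ofList rest).discard first = []) ↔ (rest.all (· == first) = true) := by
  rw [List.eq_nil_iff_forall_not_mem, List.all_eq_true]
  constructor
  · intro h y hy
    by_contra hne
    exact h y ((PySem.Set.mem_discard _ _ _).mpr ⟨(PySem.Set.mem_ofList _ _).mpr hy, by simpa using hne⟩)
  · intro h y hy
    rcases (PySem.Set.mem_discard _ _ _).mp hy with ⟨hmem, hne⟩
    exact hne (by simpa using h y ((PySem.Set.mem_ofList _ _).mp hmem))

-- A's match test succeeds exactly when B's singleKey of the condition is the lowered symptom
theorem pvMatchA_eq_singleKey (symptom condition : String) :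
    pvMatchA symptom condition = (singleKey condition == some (PySem.Str.lower symptom)) := by
  unfold pvMatchA singleKey parse_condition
  cases hp : ((PySem.Str.split? condition "AND").getD []).map PySem.Str.strip with
  | nil => simp [PySem.Set.ofList_nil]
  | cons first rest =>
    rw [PySem.Set.ofList_cons]
    by_cases hall : rest.all (· == first) = true
    · rw [(pv_discard_nil_iff first rest).mpr hall]
      simp [hall]
    · cases hd : (PySem.Set.ofList rest).discard first with
      | nil => exact absurd ((pv_discard_nil_iff first rest).mp hd) hall
      | cons z t => simp [hall]

theorem build_adj_aux (k : String) (rules : List (String × String)) :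
    ∀ (d : PySem.Dict String (List String)),
      (rules.foldl
        (fun d p =>
          match singleKey p.1 with
          | some k' => d.modify k' [] (fun l => l ++ [p.2])
          | none => d) d).getD k [] =
      d.getD k [] ++ rules.filterMap (fun p => if singleKey p.1 = some k then some p.2 else none) := by
  induction rules with
  | nil => intro d; simp
  | cons p rs ih =>
    intro d
    rw [List.foldl_cons, ih]
    cases hk : singleKey p.1 with
    | none => simp [hk]
    | some k' =>
      by_cases hkk : k = k'
      · subst hkk
        rw [PySem.Dict.getD_modify]
        simp [hk]
      · rw [PySem.Dict.getD_modify, if_neg hkk]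
        have : ¬ (singleKey p.1 = some k) := by rw [hk]; simp [Ne.symm hkk]
        simp [this]

-- the adjacency dict's bucket at k is exactly the results of the rules whose singleKey is k
theorem build_adj_getD (rules : List (String × String)) (k : String) :
    (build_adj rules).getD k [] =
      rules.filterMap (fun p => if singleKey p.1 = some k then some p.2 else none) := by
  unfold build_adj
  rw [build_adj_aux]
  simp

-- forward_chain = dfs over the precomputed adjacency, at every fuel
theorem forward_chain_eq_dfs (fuel : Nat) (sym : String) (rules : List (String × String))
    (visited : PySem.Set String) :
    forward_chain fuel sym rules visited = dfs_alt fuel (build_adj rules) sym visited := by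
  induction fuel generalizing sym visited with
  | zero => rfl
  | succ f ih =>
    simp only [forward_chain, dfs_alt]
    rw [build_adj_getD, List.foldl_filterMap]
    refine congrArg Prod.snd ?_
    refine PySem.List.foldl_congr_mem _ _ _ _ ?_
    intro st p hp
    rw [pvMatchA_eq_singleKey]
    by_cases h : singleKey p.1 = some (PySem.Str.lower sym)
    · simp only [h, beq_self_eq_true, if_true]
      simp only [ih]
    · simp [h]

-- ===== VERDICT (by name: the statement is the Claim_ definition above) =====
theorem find_causes_with_chain_spec : Claim_equal_find_causes_with_chain := by
  intro symptom rules _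
  unfold Spec_find_causes_with_chain find_causes_with_chain find_causes_with_chain_alt
  dsimp only
  rw [build_adj_getD, List.foldl_filterMap]
  refine PySem.List.foldl_congr_mem _ _ _ _ ?_
  intro causes p hp
  rw [pvMatchA_eq_singleKey]
  by_cases h : singleKey p.1 = some (PySem.Str.lower symptom)
  · simp only [h, beq_self_eq_true, if_true]
    simp only [forward_chain_eq_dfs]
  · simp [h]
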